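-- pv_equiv track=rewrite | github.com/ronit450/Habib-University-Semester2-DSA-Programs | DSAProject/Creating Random Ids.py | id_generator
-- ===== SOURCE A (Python) =====
-- def helper_of_id(name):
--     name = str.lower(name)
--     name = name[0:1]
--     return name
--
-- def id_generator(lst_of_names):
--     lst_of_emails = []
--     habib_id= []
--     code = 1
--     for i in lst_of_names:
--         name = str.split(i)
--         first_letter = helper_of_id(name[0])
--         second_letter = helper_of_id(name[1])
--         if code <= 9:
--             id = first_letter + second_letter +'0600' + str(code) + '@st.hu.edu.pk'
--             habib_id.append('0600' + str(code))
--         elif code >= 10 and code <= 99: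
--             id = first_letter + second_letter + '060' + str(code) + '@st.hu.edu.pk'
--             habib_id.append('060' + str(code))
--         elif code >= 100 and code <= 999:
--             id = first_letter + second_letter + '06' + str(code) + '@st.hu.edu.pk'
--             habib_id.append('06' + str(code))
--         lst_of_emails.append(id)
--         code += 1
--     return lst_of_emails, habib_id
-- ===== SOURCE B (Python) =====
-- def id_generator(lst_of_names):
--     digits = '0123456789'
--     table = ['06' + a + b + c for a in digits for b in digits for c in digits]
--     habib_id = table[1:len(lst_of_names) + 1]
--     lst_of_emails = [(name.split()[0][:1] + name.split()[1][:1]).lower() + num + '@st.hu.edu.pk'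
--                      for name, num in zip(lst_of_names, habib_id)]
--     return lst_of_emails, habib_id
-- ===== Notes on version B (the rewrite author's own statement) =====
-- stated objective: alternative
-- what changed: Replaces the counter-driven loop with three digit-range padding branches by a precomputed lexicographic table of all '06'+three-digit codes (a triple comprehension over the digit characters, no integer formatting), sliced to the list length and zipped with the names; Pre_ excludes names with fewer than two words (A raises IndexError) and lists of 1000+ names, where A's loop-carried id goes stale and it re-appends the 999th email for every later name, which B's code table does not reproduce.
-- outside the precondition, e.g. on id_generator(['Solo']): A raises IndexError, B raises IndexError
import Mathlib
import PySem

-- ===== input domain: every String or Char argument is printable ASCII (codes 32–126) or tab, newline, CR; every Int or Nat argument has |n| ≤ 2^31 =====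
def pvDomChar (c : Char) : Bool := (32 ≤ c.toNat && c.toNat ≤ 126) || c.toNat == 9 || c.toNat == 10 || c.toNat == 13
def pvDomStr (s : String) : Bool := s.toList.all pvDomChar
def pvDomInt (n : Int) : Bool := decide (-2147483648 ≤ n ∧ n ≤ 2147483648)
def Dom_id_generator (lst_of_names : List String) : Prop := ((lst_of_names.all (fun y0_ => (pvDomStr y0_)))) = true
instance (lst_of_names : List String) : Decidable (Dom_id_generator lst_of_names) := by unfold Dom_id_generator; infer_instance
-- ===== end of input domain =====

-- B replaces A's counter loop with its three digit-range branches by a precomputed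
-- lexicographic table of all '06'+three-digit codes (a triple comprehension over the
-- digit characters, no integer formatting), sliced to the list length and zipped with
-- the names.

-- ===== PORT A =====
def pvHelperOfId (name : String) : String :=
  let name := PySem.Str.lower name
  let name := PySem.Str.slice name (some 0) (some 1)
  name

-- the body of A's for-loop; state = (lst_of_emails, habib_id, code, id).
-- Python raises IndexError at name[0]/name[1] when a name has fewer than two words;
-- the '.getD ""' defaults are reached exactly there, outside Pre_id_generator.
def pvStepA (st : List String × List String × Int × String) (i : String) :
    List String × List String × Int × String :=
  let emails := st.1; let habib := st.2.1; let code := st.2.2.1; let idv := st.2.2.2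
  let name := PySem.Str.split₀ i
  let first_letter := pvHelperOfId ((PySem.List.pyGet? name 0).getD "")
  let second_letter := pvHelperOfId ((PySem.List.pyGet? name 1).getD "")
  if code ≤ 9 then
    let idv := first_letter ++ second_letter ++ "0600" ++ PySem.Int.toStr code ++ "@st.hu.edu.pk"
    (emails ++ [idv], habib ++ ["0600" ++ PySem.Int.toStr code], code + 1, idv)
  else if 10 ≤ code ∧ code ≤ 99 then
    let idv := first_letter ++ second_letter ++ "060" ++ PySem.Int.toStr code ++ "@st.hu.edu.pk"
    (emails ++ [idv], habib ++ ["060" ++ PySem.Int.toStr code], code + 1, idv)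
  else if 100 ≤ code ∧ code ≤ 999 then
    let idv := first_letter ++ second_letter ++ "06" ++ PySem.Int.toStr code ++ "@st.hu.edu.pk"
    (emails ++ [idv], habib ++ ["06" ++ PySem.Int.toStr code], code + 1, idv)
  else
    (emails ++ [idv], habib, code + 1, idv)

def id_generator (lst_of_names : List String) : List String × List String :=
  let st := lst_of_names.foldl pvStepA ([], [], 1, "")
  (st.1, st.2.1)

-- ===== PORT B =====
def id_generator_alt (lst_of_names : List String) : List String × List String :=
  let digits := "0123456789".toList
  let table := digits.flatMap (fun a => digits.flatMap (fun b => digits.map (fun c =>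
    "06" ++ String.ofList [a] ++ String.ofList [b] ++ String.ofList [c])))
  let habib_id := PySem.List.slice table (some 1) (some (PySem.List.len lst_of_names + 1))
  let lst_of_emails := (lst_of_names.zip habib_id).map (fun p =>
    PySem.Str.lower (
      PySem.Str.slice ((PySem.List.pyGet? (PySem.Str.split₀ p.1) 0).getD "") (some 0) (some 1) ++
      PySem.Str.slice ((PySem.List.pyGet? (PySem.Str.split₀ p.1) 1).getD "") (some 0) (some 1)) ++
    p.2 ++ "@st.hu.edu.pk")
  (lst_of_emails, habib_id)

-- ===== PRECONDITION & SPEC =====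
-- Pre_ excludes (a) names with fewer than two whitespace-separated words, where A raises
-- IndexError at name[1], and (b) lists of 1000+ names, where A's loop-carried id variable
-- goes stale past code 999 and it re-appends the 999th email for every later name — an
-- accident of leftover loop state, which B's code table does not reproduce.
def Pre_id_generator (lst_of_names : List String) : Prop :=
  (∀ s ∈ lst_of_names, 2 ≤ (PySem.Str.split₀ s).length) ∧ lst_of_names.length ≤ 999
instance (lst_of_names : List String) : Decidable (Pre_id_generator lst_of_names) := by
  unfold Pre_id_generator; infer_instance
def pvWitness_id_generator : List String := (["Ali Khan", "Bo Li"])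

def Spec_id_generator (lst_of_names : List String) (out : List String × List String) : Prop :=
  out = id_generator_alt lst_of_names
instance (lst_of_names : List String) (out : List String × List String) :
    Decidable (Spec_id_generator lst_of_names out) := by unfold Spec_id_generator; infer_instance

-- ===== CLAIM (what is proved, stated in full; the proofs are below) =====
def Claim_equal_id_generator : Prop := ∀ (lst_of_names : List String),
  Dom_id_generator lst_of_names → Pre_id_generator lst_of_names →
  Spec_id_generator lst_of_names (id_generator lst_of_names)

-- ===== LEMMAS AND PROOFS =====

-- ---- Nat.toDigits on 1-, 2- and 3-digit numbers ----
theorem pv_tdc_small (f n : ℕ) (acc : List Char) (h : n < 10) :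
    Nat.toDigitsCore 10 (f+1) n acc = n.digitChar :: acc := by
  simp [Nat.toDigitsCore, Nat.div_eq_of_lt h, Nat.mod_eq_of_lt h]

theorem pv_td1 (n : ℕ) (h : n < 10) : Nat.toDigits 10 n = [n.digitChar] := by
  simpa [Nat.toDigits] using pv_tdc_small n n [] h

theorem pv_tdc_step (f n : ℕ) (acc : List Char) (h : 10 ≤ n) :
    Nat.toDigitsCore 10 (f+1) n acc = Nat.toDigitsCore 10 f (n/10) ((n % 10).digitChar :: acc) := by
  have : n / 10 ≠ 0 := by omega
  simp [Nat.toDigitsCore, this]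

theorem pv_td2 (n : ℕ) (h1 : 10 ≤ n) (h2 : n < 100) :
    Nat.toDigits 10 n = [(n/10).digitChar, (n % 10).digitChar] := by
  have hf : n + 1 = (n - 1) + 1 + 1 := by omega
  rw [Nat.toDigits, hf, pv_tdc_step _ _ _ h1, pv_tdc_small _ _ _ (by omega)]

theorem pv_td3 (n : ℕ) (h1 : 100 ≤ n) (h2 : n < 1000) :
    Nat.toDigits 10 n = [(n/100).digitChar, (n/10 % 10).digitChar, (n % 10).digitChar] := by
  have hf : n + 1 = (n - 2) + 1 + 1 + 1 := by omega
  rw [Nat.toDigits, hf, pv_tdc_step _ _ _ (by omega), pv_tdc_step _ _ _ (by omega),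
    pv_tdc_small _ _ _ (by omega)]
  congr 2
  omega

theorem pv_digitChar_ne (n : ℕ) (h : n < 10) : ¬ (n.digitChar = '+' ∨ n.digitChar = '-') := by
  interval_cases n <;> decide

-- ---- building blocks shared by the two descriptions ----
def pvIniB (x : String) : String :=
  PySem.Str.lower (
    PySem.Str.slice ((PySem.List.pyGet? (PySem.Str.split₀ x) 0).getD "") (some 0) (some 1) ++
    PySem.Str.slice ((PySem.List.pyGet? (PySem.Str.split₀ x) 1).getD "") (some 0) (some 1))

def pvNumC (c : Int) : String := "06" ++ PySem.Str.zfill (PySem.Int.toStr c) 3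

def pvEm : List String → Nat → List String
  | [], _ => []
  | x :: xs, k => (pvIniB x ++ pvNumC ((k:Int)+1) ++ "@st.hu.edu.pk") :: pvEm xs (k+1)

def pvNums : Nat → Nat → List String
  | 0, _ => []
  | m+1, k => pvNumC ((k:Int)+1) :: pvNums m (k+1)

-- ---- initials: lower-then-slice per word (A) = slice-then-concat-then-lower (B) ----
theorem pv_ini_eq (a b : String) :
    pvHelperOfId a ++ pvHelperOfId b =
      PySem.Str.lower (PySem.Str.slice a (some 0) (some 1) ++
        PySem.Str.slice b (some 0) (some 1)) := by
  rw [← String.toList_inj]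
  simp [pvHelperOfId, PySem.Str.toList_lower, PySem.Str.toList_slice, PySem.Chars.lower,
    String.toList_append, PySem.Chars.slice_eq_listSlice, PySem.List.slice_to,
    List.map_take]

-- ---- the three branch number strings are the zero-padded block ----
theorem pv_toChars_nonneg (c : Int) (h : 0 ≤ c) :
    PySem.Int.toChars c = Nat.toDigits 10 c.toNat := by
  simp [PySem.Int.toChars, not_lt.mpr h]

theorem pv_numC1 (c : Int) (h1 : 1 ≤ c) (h2 : c ≤ 9) :
    "0600" ++ PySem.Int.toStr c = pvNumC c := by
  rw [← String.toList_inj]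
  have hd := pv_td1 c.toNat (by omega)
  have hne := pv_digitChar_ne c.toNat (by omega)
  simp [pvNumC, String.toList_append, PySem.Str.toList_zfill, PySem.Int.toList_toStr,
    pv_toChars_nonneg c (by omega), hd, PySem.Chars.zfill, hne]

theorem pv_numC2 (c : Int) (h1 : 10 ≤ c) (h2 : c ≤ 99) :
    "060" ++ PySem.Int.toStr c = pvNumC c := by
  rw [← String.toList_inj]
  have hd := pv_td2 c.toNat (by omega) (by omega)
  have hne := pv_digitChar_ne (c.toNat / 10) (by omega)
  simp [pvNumC, String.toList_append, PySem.Str.toList_zfill, PySem.Int.toList_toStr,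
    pv_toChars_nonneg c (by omega), hd, PySem.Chars.zfill, hne]

theorem pv_numC3 (c : Int) (h1 : 100 ≤ c) (h2 : c ≤ 999) :
    "06" ++ PySem.Int.toStr c = pvNumC c := by
  rw [← String.toList_inj]
  have hd := pv_td3 c.toNat (by omega) (by omega)
  simp [pvNumC, String.toList_append, PySem.Str.toList_zfill, PySem.Int.toList_toStr,
    pv_toChars_nonneg c (by omega), hd, PySem.Chars.zfill]

-- ---- A's fold in the productive regime (code never leaves 1..999) ----
theorem pv_foldA (lst : List String) : ∀ (E H : List String) (idv : String) (k : ℕ),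
    k + lst.length ≤ 999 →
    lst.foldl pvStepA (E, H, (k:Int)+1, idv) =
      (E ++ pvEm lst k, H ++ pvNums lst.length k,
       (k:Int) + lst.length + 1, (pvEm lst k).getLastD idv) := by
  induction lst with
  | nil => intro E H idv k _; simp [pvEm, pvNums]
  | cons x xs ih =>
    intro E H idv k h
    rw [List.foldl_cons]
    have hstep : pvStepA (E, H, (k:Int)+1, idv) x =
        (E ++ [pvIniB x ++ pvNumC ((k:Int)+1) ++ "@st.hu.edu.pk"],
         H ++ [pvNumC ((k:Int)+1)], (k:Int)+1+1,
         pvIniB x ++ pvNumC ((k:Int)+1) ++ "@st.hu.edu.pk") := by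
      simp only [pvStepA, pvIniB]
      by_cases h9 : k < 9
      · rw [if_pos (by omega)]
        rw [pv_ini_eq, ← pv_numC1 ((k:Int)+1) (by omega) (by omega)]
        simp [String.append_assoc]
      by_cases h99 : k < 99
      · rw [if_neg (by omega), if_pos (by constructor <;> omega)]
        rw [pv_ini_eq, ← pv_numC2 ((k:Int)+1) (by omega) (by omega)]
        simp [String.append_assoc]
      · rw [if_neg (by omega), if_neg (by omega),
          if_pos (by constructor <;> (simp at h; omega))]
        rw [pv_ini_eq, ← pv_numC3 ((k:Int)+1) (by omega) (by simp at h; omega)]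
        simp [String.append_assoc]
    rw [hstep]
    have hc : ((k:Int)+1+1) = ((k+1 : ℕ) : Int)+1 := by push_cast; ring
    rw [hc, ih _ _ _ (k+1) (by simp at h ⊢; omega)]
    simp only [pvEm, pvNums, List.length_cons, Prod.mk.injEq, List.append_assoc,
      List.singleton_append, List.getLastD_cons]
    exact ⟨trivial, trivial, by push_cast; ring, trivial⟩

-- ---- B's digit-triple table is '06000' followed by the padded block 001..999 ----
set_option maxRecDepth 40000 in
set_option maxHeartbeats 4000000 in
theorem pv_table :
    ("0123456789".toList.flatMap (fun a => "0123456789".toList.flatMap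
        (fun b => "0123456789".toList.map (fun c =>
          "06" ++ String.ofList [a] ++ String.ofList [b] ++ String.ofList [c])))) =
      "06000" :: pvNums 999 0 := by
  decide

-- ---- take of the padded block ----
theorem pv_take_pvNums (m : ℕ) : ∀ (j k : ℕ),
    (pvNums m k).take j = pvNums (min j m) k := by
  induction m with
  | zero => intro j k; simp [pvNums]
  | succ m ih =>
    intro j k
    cases j with
    | zero => simp [pvNums]
    | succ j => simp [pvNums, List.take_succ_cons, ih j (k+1), Nat.succ_min_succ]

-- ---- B's zip-comprehension builds the same email list ----
theorem pv_zipem (lst : List String) : ∀ (m k : ℕ),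
    ((lst.zip (pvNums m k)).map (fun p => pvIniB p.1 ++ p.2 ++ "@st.hu.edu.pk")) =
      pvEm (lst.take m) k := by
  induction lst with
  | nil => intro m k; simp [pvEm]
  | cons x xs ih =>
    intro m k
    cases m with
    | zero => simp [pvNums, pvEm]
    | succ m => simp [pvNums, pvEm, List.zip_cons_cons, ih m (k+1)]

-- ===== VERDICT (by name: the statement is the Claim_ definition above) =====
theorem id_generator_spec : Claim_equal_id_generator := by
  intro lst _dom pre
  unfold Spec_id_generator
  obtain ⟨-, hlen⟩ := pre
  set n := lst.length with hn
  -- A's side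
  have hA : id_generator lst = (pvEm lst 0, pvNums n 0) := by
    have h := pv_foldA lst [] [] "" 0 (by omega)
    simp only [Nat.cast_zero, zero_add] at h
    simp [id_generator, h, hn]
  -- B's side
  have hlam : (fun p : String × String =>
      PySem.Str.lower (
        PySem.Str.slice ((PySem.List.pyGet? (PySem.Str.split₀ p.1) 0).getD "") (some 0) (some 1) ++
        PySem.Str.slice ((PySem.List.pyGet? (PySem.Str.split₀ p.1) 1).getD "") (some 0) (some 1)) ++
      p.2 ++ "@st.hu.edu.pk")
      = (fun p : String × String => pvIniB p.1 ++ p.2 ++ "@st.hu.edu.pk") := rfl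
  have hslice : PySem.List.slice ("06000" :: pvNums 999 0) (some 1)
      (some (PySem.List.len lst + 1)) = pvNums n 0 := by
    have h1 : PySem.List.len lst + 1 = (((n+1 : ℕ)) : Int) := by
      simp [PySem.List.len_eq, hn]
    have h0 : (1 : Int) = ((1 : ℕ) : Int) := by norm_num
    rw [h1, h0, PySem.List.slice_natCast]
    simp [pv_take_pvNums, Nat.min_eq_left hlen]
  have hB : id_generator_alt lst = (pvEm lst 0, pvNums n 0) := by
    simp only [id_generator_alt, pv_table, hslice, hlam]
    rw [pv_zipem lst n 0, hn, List.take_length]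
  rw [hA, hB]
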